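-- pv_equiv track=rewrite | github.com/ACLUmass/RMV-FaceSurveilance-Emails | mlpipe/add_feats/code/email2log.py | first_nm_eq
-- ===== SOURCE A (Python) =====
-- def first_nm_eq(nm0,nm1):
--   sames = [['Anthony','Tony'],
--            ['Susan','Sue'],
--            ['Jamie','Jaime'],
--            ['Stephen','Stepher'],
--            ['Timothy','Tim'],
--            ['Joao','Jogo'],
--            ['Michael','Mike'],
--            ['Robert','Bobby'],
--            ['Benjamin','Ben']]
--
--   for same in sames:
--     if nm0 in same and nm1 in same:
--       return True
--   if nm0 == nm1:
--     return True
--   return False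
-- ===== SOURCE B (Python) =====
-- def first_nm_eq(nm0, nm1):
--     sames = [['Anthony', 'Tony'],
--              ['Susan', 'Sue'],
--              ['Jamie', 'Jaime'],
--              ['Stephen', 'Stepher'],
--              ['Timothy', 'Tim'],
--              ['Joao', 'Jogo'],
--              ['Michael', 'Mike'],
--              ['Robert', 'Bobby'],
--              ['Benjamin', 'Ben']]
--     canon = {name: pair[0] for pair in sames for name in pair}
--     return canon.get(nm0, nm0) == canon.get(nm1, nm1)
-- ===== Notes on version B (the rewrite author's own statement) =====
-- stated objective: idiomatic
-- what changed: B replaces A's scan over the nickname pairs (membership test of both names in each pair, then an equality fallback) by a canonicalisation dict built once (each name maps to the first name of its pair) followed by a single comparison of the two canonical forms.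
import Mathlib
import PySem

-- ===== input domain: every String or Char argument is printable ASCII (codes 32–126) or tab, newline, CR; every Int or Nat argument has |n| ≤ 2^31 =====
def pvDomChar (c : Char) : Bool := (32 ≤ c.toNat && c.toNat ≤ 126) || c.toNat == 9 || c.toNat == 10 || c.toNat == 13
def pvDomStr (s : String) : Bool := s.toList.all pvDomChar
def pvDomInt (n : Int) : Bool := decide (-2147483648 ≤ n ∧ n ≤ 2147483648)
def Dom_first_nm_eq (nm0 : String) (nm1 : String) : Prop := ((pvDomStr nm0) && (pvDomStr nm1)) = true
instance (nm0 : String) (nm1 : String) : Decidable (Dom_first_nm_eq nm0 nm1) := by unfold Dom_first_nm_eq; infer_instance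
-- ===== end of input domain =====

-- B replaces A's scan over the nickname pairs by a canonicalisation dict built once
-- (name ↦ first name of its pair) and a single comparison of canonical forms (objective: idiomatic).

-- ===== PORT A =====
-- the literal nickname table (shared by both ports)
def pvSames : List (List String) := [["Anthony", "Tony"],
                                     ["Susan", "Sue"],
                                     ["Jamie", "Jaime"],
                                     ["Stephen", "Stepher"],
                                     ["Timothy", "Tim"],
                                     ["Joao", "Jogo"],
                                     ["Michael", "Mike"],
                                     ["Robert", "Bobby"],
                                     ["Benjamin", "Ben"]]

-- A's loop: 'for same in sames: if nm0 in same and nm1 in same: return True'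
def pvLoopA : List (List String) → String → String → Bool
  | [], nm0, nm1 => if nm0 == nm1 then true else false
  | same :: rest, nm0, nm1 =>
      if same.contains nm0 && same.contains nm1 then true else pvLoopA rest nm0 nm1

def first_nm_eq (nm0 : String) (nm1 : String) : Bool := pvLoopA pvSames nm0 nm1

-- ===== PORT B =====
-- canon = {name: pair[0] for pair in sames for name in pair}
-- (pair[0] is PySem.List.pyGet? pair 0; every pair in the literal table is nonempty, so the .getD "" default is never used)
def pvCanonB : PySem.Dict String String :=
  pvSames.foldl (fun d pair =>
    pair.foldl (fun d name => d.insert name ((PySem.List.pyGet? pair 0).getD "")) d) PySem.Dict.empty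

-- return canon.get(nm0, nm0) == canon.get(nm1, nm1)
def first_nm_eq_alt (nm0 : String) (nm1 : String) : Bool :=
  pvCanonB.getD nm0 nm0 == pvCanonB.getD nm1 nm1

-- ===== PRECONDITION & SPEC =====
def Spec_first_nm_eq (nm0 : String) (nm1 : String) (out : Bool) : Prop := out = first_nm_eq_alt nm0 nm1
instance (nm0 : String) (nm1 : String) (out : Bool) : Decidable (Spec_first_nm_eq nm0 nm1 out) := by unfold Spec_first_nm_eq; infer_instance

-- ===== CLAIM (what is proved, stated in full; the proofs are below) =====
def Claim_equal_first_nm_eq : Prop := ∀ (nm0 : String) (nm1 : String), Dom_first_nm_eq nm0 nm1 → Spec_first_nm_eq nm0 nm1 (first_nm_eq nm0 nm1)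

-- ===== LEMMAS AND PROOFS =====
-- every string is one of the 18 listed names, or none of them
lemma pv_classify (nm : String) : nm = "Anthony" ∨ nm = "Tony" ∨ nm = "Susan" ∨ nm = "Sue" ∨ nm = "Jamie" ∨ nm = "Jaime" ∨ nm = "Stephen" ∨ nm = "Stepher" ∨ nm = "Timothy" ∨ nm = "Tim" ∨ nm = "Joao" ∨ nm = "Jogo" ∨ nm = "Michael" ∨ nm = "Mike" ∨ nm = "Robert" ∨ nm = "Bobby" ∨ nm = "Benjamin" ∨ nm = "Ben" ∨ (nm ≠ "Anthony" ∧ nm ≠ "Tony" ∧ nm ≠ "Susan" ∧ nm ≠ "Sue" ∧ nm ≠ "Jamie" ∧ nm ≠ "Jaime" ∧ nm ≠ "Stephen" ∧ nm ≠ "Stepher" ∧ nm ≠ "Timothy" ∧ nm ≠ "Tim" ∧ nm ≠ "Joao" ∧ nm ≠ "Jogo" ∧ nm ≠ "Michael" ∧ nm ≠ "Mike" ∧ nm ≠ "Robert" ∧ nm ≠ "Bobby" ∧ nm ≠ "Benjamin" ∧ nm ≠ "Ben") := by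
  by_cases h0 : nm = "Anthony"
  · exact Or.inl h0
  by_cases h1 : nm = "Tony"
  · exact Or.inr (Or.inl h1)
  by_cases h2 : nm = "Susan"
  · exact Or.inr (Or.inr (Or.inl h2))
  by_cases h3 : nm = "Sue"
  · exact Or.inr (Or.inr (Or.inr (Or.inl h3)))
  by_cases h4 : nm = "Jamie"
  · exact Or.inr (Or.inr (Or.inr (Or.inr (Or.inl h4))))
  by_cases h5 : nm = "Jaime"
  · exact Or.inr (Or.inr (Or.inr (Or.inr (Or.inr (Or.inl h5)))))
  by_cases h6 : nm = "Stephen"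
  · exact Or.inr (Or.inr (Or.inr (Or.inr (Or.inr (Or.inr (Or.inl h6))))))
  by_cases h7 : nm = "Stepher"
  · exact Or.inr (Or.inr (Or.inr (Or.inr (Or.inr (Or.inr (Or.inr (Or.inl h7)))))))
  by_cases h8 : nm = "Timothy"
  · exact Or.inr (Or.inr (Or.inr (Or.inr (Or.inr (Or.inr (Or.inr (Or.inr (Or.inl h8))))))))
  by_cases h9 : nm = "Tim"
  · exact Or.inr (Or.inr (Or.inr (Or.inr (Or.inr (Or.inr (Or.inr (Or.inr (Or.inr (Or.inl h9)))))))))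
  by_cases h10 : nm = "Joao"
  · exact Or.inr (Or.inr (Or.inr (Or.inr (Or.inr (Or.inr (Or.inr (Or.inr (Or.inr (Or.inr (Or.inl h10))))))))))
  by_cases h11 : nm = "Jogo"
  · exact Or.inr (Or.inr (Or.inr (Or.inr (Or.inr (Or.inr (Or.inr (Or.inr (Or.inr (Or.inr (Or.inr (Or.inl h11)))))))))))
  by_cases h12 : nm = "Michael"
  · exact Or.inr (Or.inr (Or.inr (Or.inr (Or.inr (Or.inr (Or.inr (Or.inr (Or.inr (Or.inr (Or.inr (Or.inr (Or.inl h12))))))))))))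
  by_cases h13 : nm = "Mike"
  · exact Or.inr (Or.inr (Or.inr (Or.inr (Or.inr (Or.inr (Or.inr (Or.inr (Or.inr (Or.inr (Or.inr (Or.inr (Or.inr (Or.inl h13)))))))))))))
  by_cases h14 : nm = "Robert"
  · exact Or.inr (Or.inr (Or.inr (Or.inr (Or.inr (Or.inr (Or.inr (Or.inr (Or.inr (Or.inr (Or.inr (Or.inr (Or.inr (Or.inr (Or.inl h14))))))))))))))
  by_cases h15 : nm = "Bobby"
  · exact Or.inr (Or.inr (Or.inr (Or.inr (Or.inr (Or.inr (Or.inr (Or.inr (Or.inr (Or.inr (Or.inr (Or.inr (Or.inr (Or.inr (Or.inr (Or.inl h15)))))))))))))))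
  by_cases h16 : nm = "Benjamin"
  · exact Or.inr (Or.inr (Or.inr (Or.inr (Or.inr (Or.inr (Or.inr (Or.inr (Or.inr (Or.inr (Or.inr (Or.inr (Or.inr (Or.inr (Or.inr (Or.inr (Or.inl h16))))))))))))))))
  by_cases h17 : nm = "Ben"
  · exact Or.inr (Or.inr (Or.inr (Or.inr (Or.inr (Or.inr (Or.inr (Or.inr (Or.inr (Or.inr (Or.inr (Or.inr (Or.inr (Or.inr (Or.inr (Or.inr (Or.inr (Or.inl h17)))))))))))))))))
  exact Or.inr (Or.inr (Or.inr (Or.inr (Or.inr (Or.inr (Or.inr (Or.inr (Or.inr (Or.inr (Or.inr (Or.inr (Or.inr (Or.inr (Or.inr (Or.inr (Or.inr (Or.inr (⟨h0, h1, h2, h3, h4, h5, h6, h7, h8, h9, h10, h11, h12, h13, h14, h15, h16, h17⟩))))))))))))))))))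

-- ===== VERDICT (by name: the statement is the Claim_ definition above) =====
set_option maxHeartbeats 2000000 in
theorem first_nm_eq_spec : Claim_equal_first_nm_eq := by
  intro nm0 nm1 _
  unfold Spec_first_nm_eq
  rcases pv_classify nm0 with h0|h0|h0|h0|h0|h0|h0|h0|h0|h0|h0|h0|h0|h0|h0|h0|h0|h0|h0 <;>
    rcases pv_classify nm1 with h1|h1|h1|h1|h1|h1|h1|h1|h1|h1|h1|h1|h1|h1|h1|h1|h1|h1|h1 <;>
      first
      | (obtain ⟨a0,a1,a2,a3,a4,a5,a6,a7,a8,a9,a10,a11,a12,a13,a14,a15,a16,a17⟩ := h0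
         obtain ⟨b0,b1,b2,b3,b4,b5,b6,b7,b8,b9,b10,b11,b12,b13,b14,b15,b16,b17⟩ := h1
         simp [first_nm_eq, first_nm_eq_alt, pvLoopA, pvSames, pvCanonB,
               PySem.Dict.getD, PySem.Dict.get?, PySem.Dict.empty, PySem.Dict.insert,
               PySem.List.pyGet?, PySem.List.pyIdx?, List.find?, beq_eq_decide, a0,a1,a2,a3,a4,a5,a6,a7,a8,a9,a10,a11,a12,a13,a14,a15,a16,a17, b0,b1,b2,b3,b4,b5,b6,b7,b8,b9,b10,b11,b12,b13,b14,b15,b16,b17, Ne.symm a0, beq_eq_false_iff_ne.mpr a0, beq_eq_false_iff_ne.mpr (Ne.symm a0), Ne.symm a1, beq_eq_false_iff_ne.mpr a1, beq_eq_false_iff_ne.mpr (Ne.symm a1), Ne.symm a2, beq_eq_false_iff_ne.mpr a2, beq_eq_false_iff_ne.mpr (Ne.symm a2), Ne.symm a3, beq_eq_false_iff_ne.mpr a3, beq_eq_false_iff_ne.mpr (Ne.symm a3), Ne.symm a4, beq_eq_false_iff_ne.mpr a4, beq_eq_false_iff_ne.mpr (Ne.symm a4), Ne.symm a5, beq_eq_false_iff_ne.mpr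 a5, beq_eq_false_iff_ne.mpr (Ne.symm a5), Ne.symm a6, beq_eq_false_iff_ne.mpr a6, beq_eq_false_iff_ne.mpr (Ne.symm a6), Ne.symm a7, beq_eq_false_iff_ne.mpr a7, beq_eq_false_iff_ne.mpr (Ne.symm a7), Ne.symm a8, beq_eq_false_iff_ne.mpr a8, beq_eq_false_iff_ne.mpr (Ne.symm a8), Ne.symm a9, beq_eq_false_iff_ne.mpr a9, beq_eq_false_iff_ne.mpr (Ne.symm a9), Ne.symm a10, beq_eq_false_iff_ne.mpr a10, beq_eq_false_iff_ne.mpr (Ne.symm a10), Ne.symm a11, beq_eq_false_iff_ne.mpr a11, beq_eq_false_iff_ne.mpr (Ne.symm a11), Ne.symm a12, beq_eq_false_iff_ne.mpr a12, beq_eq_false_iff_ne.mpr (Ne.symm a12), Ne.symm a13, beq_eq_false_iff_ne.mpr a13, beq_eq_false_iff_ne.mpr (Ne.symm a13), Ne.symm a14, beq_eq_false_iff_ne.mpr a14, beq_eq_false_iff_ne.mpr (Ne.symm a14), Ne.symm a15, beq_eq_false_iff_ne.mpr a15, beq_eq_false_iff_ne.mpr (Ne.symm a15), Ne.symm a16,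 beq_eq_false_iff_ne.mpr a16, beq_eq_false_iff_ne.mpr (Ne.symm a16), Ne.symm a17, beq_eq_false_iff_ne.mpr a17, beq_eq_false_iff_ne.mpr (Ne.symm a17), Ne.symm b0, beq_eq_false_iff_ne.mpr b0, beq_eq_false_iff_ne.mpr (Ne.symm b0), Ne.symm b1, beq_eq_false_iff_ne.mpr b1, beq_eq_false_iff_ne.mpr (Ne.symm b1), Ne.symm b2, beq_eq_false_iff_ne.mpr b2, beq_eq_false_iff_ne.mpr (Ne.symm b2), Ne.symm b3, beq_eq_false_iff_ne.mpr b3, beq_eq_false_iff_ne.mpr (Ne.symm b3), Ne.symm b4, beq_eq_false_iff_ne.mpr b4, beq_eq_false_iff_ne.mpr (Ne.symm b4), Ne.symm b5, beq_eq_false_iff_ne.mpr b5, beq_eq_false_iff_ne.mpr (Ne.symm b5), Ne.symm b6, beq_eq_false_iff_ne.mpr b6, beq_eq_false_iff_ne.mpr (Ne.symm b6), Ne.symm b7, beq_eq_false_iff_ne.mpr b7, beq_eq_false_iff_ne.mpr (Ne.symm b7), Ne.symm b8, beq_eq_false_iff_ne.mpr b8, beq_eq_false_iff_ne.mpr (Ne.symm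 b8), Ne.symm b9, beq_eq_false_iff_ne.mpr b9, beq_eq_false_iff_ne.mpr (Ne.symm b9), Ne.symm b10, beq_eq_false_iff_ne.mpr b10, beq_eq_false_iff_ne.mpr (Ne.symm b10), Ne.symm b11, beq_eq_false_iff_ne.mpr b11, beq_eq_false_iff_ne.mpr (Ne.symm b11), Ne.symm b12, beq_eq_false_iff_ne.mpr b12, beq_eq_false_iff_ne.mpr (Ne.symm b12), Ne.symm b13, beq_eq_false_iff_ne.mpr b13, beq_eq_false_iff_ne.mpr (Ne.symm b13), Ne.symm b14, beq_eq_false_iff_ne.mpr b14, beq_eq_false_iff_ne.mpr (Ne.symm b14), Ne.symm b15, beq_eq_false_iff_ne.mpr b15, beq_eq_false_iff_ne.mpr (Ne.symm b15), Ne.symm b16, beq_eq_false_iff_ne.mpr b16, beq_eq_false_iff_ne.mpr (Ne.symm b16), Ne.symm b17, beq_eq_false_iff_ne.mpr b17, beq_eq_false_iff_ne.mpr (Ne.symm b17)])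
      | (obtain ⟨a0,a1,a2,a3,a4,a5,a6,a7,a8,a9,a10,a11,a12,a13,a14,a15,a16,a17⟩ := h0
         subst h1
         simp [first_nm_eq, first_nm_eq_alt, pvLoopA, pvSames, pvCanonB,
               PySem.Dict.getD, PySem.Dict.get?, PySem.Dict.empty, PySem.Dict.insert,
               PySem.List.pyGet?, PySem.List.pyIdx?, List.find?, beq_eq_decide, a0,a1,a2,a3,a4,a5,a6,a7,a8,a9,a10,a11,a12,a13,a14,a15,a16,a17, Ne.symm a0, beq_eq_false_iff_ne.mpr a0, beq_eq_false_iff_ne.mpr (Ne.symm a0), Ne.symm a1, beq_eq_false_iff_ne.mpr a1, beq_eq_false_iff_ne.mpr (Ne.symm a1), Ne.symm a2, beq_eq_false_iff_ne.mpr a2, beq_eq_false_iff_ne.mpr (Ne.symm a2), Ne.symm a3, beq_eq_false_iff_ne.mpr a3, beq_eq_false_iff_ne.mpr (Ne.symm a3), Ne.symm a4, beq_eq_false_iff_ne.mpr a4, beq_eq_false_iff_ne.mpr (Ne.symm a4), Ne.symm a5, beq_eq_false_iff_ne.mpr a5, beq_eq_false_iff_ne.mpr (Ne.symm a5), Ne.symm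 a6, beq_eq_false_iff_ne.mpr a6, beq_eq_false_iff_ne.mpr (Ne.symm a6), Ne.symm a7, beq_eq_false_iff_ne.mpr a7, beq_eq_false_iff_ne.mpr (Ne.symm a7), Ne.symm a8, beq_eq_false_iff_ne.mpr a8, beq_eq_false_iff_ne.mpr (Ne.symm a8), Ne.symm a9, beq_eq_false_iff_ne.mpr a9, beq_eq_false_iff_ne.mpr (Ne.symm a9), Ne.symm a10, beq_eq_false_iff_ne.mpr a10, beq_eq_false_iff_ne.mpr (Ne.symm a10), Ne.symm a11, beq_eq_false_iff_ne.mpr a11, beq_eq_false_iff_ne.mpr (Ne.symm a11), Ne.symm a12, beq_eq_false_iff_ne.mpr a12, beq_eq_false_iff_ne.mpr (Ne.symm a12), Ne.symm a13, beq_eq_false_iff_ne.mpr a13, beq_eq_false_iff_ne.mpr (Ne.symm a13), Ne.symm a14, beq_eq_false_iff_ne.mpr a14, beq_eq_false_iff_ne.mpr (Ne.symm a14), Ne.symm a15, beq_eq_false_iff_ne.mpr a15, beq_eq_false_iff_ne.mpr (Ne.symm a15), Ne.symm a16, beq_eq_false_iff_ne.mpr a16, beq_eq_false_iff_ne.mpr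 (Ne.symm a16), Ne.symm a17, beq_eq_false_iff_ne.mpr a17, beq_eq_false_iff_ne.mpr (Ne.symm a17)])
      | (obtain ⟨b0,b1,b2,b3,b4,b5,b6,b7,b8,b9,b10,b11,b12,b13,b14,b15,b16,b17⟩ := h1
         subst h0
         simp [first_nm_eq, first_nm_eq_alt, pvLoopA, pvSames, pvCanonB,
               PySem.Dict.getD, PySem.Dict.get?, PySem.Dict.empty, PySem.Dict.insert,
               PySem.List.pyGet?, PySem.List.pyIdx?, List.find?, beq_eq_decide, b0,b1,b2,b3,b4,b5,b6,b7,b8,b9,b10,b11,b12,b13,b14,b15,b16,b17, Ne.symm b0, beq_eq_false_iff_ne.mpr b0, beq_eq_false_iff_ne.mpr (Ne.symm b0), Ne.symm b1, beq_eq_false_iff_ne.mpr b1, beq_eq_false_iff_ne.mpr (Ne.symm b1), Ne.symm b2, beq_eq_false_iff_ne.mpr b2, beq_eq_false_iff_ne.mpr (Ne.symm b2), Ne.symm b3, beq_eq_false_iff_ne.mpr b3, beq_eq_false_iff_ne.mpr (Ne.symm b3), Ne.symm b4, beq_eq_false_iff_ne.mpr b4, beq_eq_false_iff_ne.mpr (Ne.symm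 b4), Ne.symm b5, beq_eq_false_iff_ne.mpr b5, beq_eq_false_iff_ne.mpr (Ne.symm b5), Ne.symm b6, beq_eq_false_iff_ne.mpr b6, beq_eq_false_iff_ne.mpr (Ne.symm b6), Ne.symm b7, beq_eq_false_iff_ne.mpr b7, beq_eq_false_iff_ne.mpr (Ne.symm b7), Ne.symm b8, beq_eq_false_iff_ne.mpr b8, beq_eq_false_iff_ne.mpr (Ne.symm b8), Ne.symm b9, beq_eq_false_iff_ne.mpr b9, beq_eq_false_iff_ne.mpr (Ne.symm b9), Ne.symm b10, beq_eq_false_iff_ne.mpr b10, beq_eq_false_iff_ne.mpr (Ne.symm b10), Ne.symm b11, beq_eq_false_iff_ne.mpr b11, beq_eq_false_iff_ne.mpr (Ne.symm b11), Ne.symm b12, beq_eq_false_iff_ne.mpr b12, beq_eq_false_iff_ne.mpr (Ne.symm b12), Ne.symm b13, beq_eq_false_iff_ne.mpr b13, beq_eq_false_iff_ne.mpr (Ne.symm b13), Ne.symm b14, beq_eq_false_iff_ne.mpr b14, beq_eq_false_iff_ne.mpr (Ne.symm b14), Ne.symm b15, beq_eq_false_iff_ne.mpr b15, beq_eq_false_iff_ne.mpr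 (Ne.symm b15), Ne.symm b16, beq_eq_false_iff_ne.mpr b16, beq_eq_false_iff_ne.mpr (Ne.symm b16), Ne.symm b17, beq_eq_false_iff_ne.mpr b17, beq_eq_false_iff_ne.mpr (Ne.symm b17)])
      | (subst h0; subst h1; decide)
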